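-- pv_equiv track=rewrite | github.com/bitzombie1/ShyBot2 | df3.py | findHotTarget
-- ===== SOURCE A (Python) =====
-- def findHotTarget(targetList):
-- 	if len(targetList) < 3:
-- 		return (0,0,0)
-- 	xLst = []
-- 	yLst = []
-- 	zLst = []
-- 	for targ in targetList:
-- 		xLst.append(targ[0])
-- 		yLst.append(targ[1])
-- 		zLst.append(targ[2])
-- 	x = listMedian(xLst)
-- 	y = listMedian(yLst)
-- 	z = listMedian(zLst)
-- 	#z = targetList[xLst.index(x)][2]
-- 	return (x,y,z)
--
-- def listMedian(inList):
-- 	nonZero = []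
-- 	for x in inList:
-- 		if x != 0:
-- 			nonZero.append(x)
-- 	cnt = len(nonZero)
-- 	if cnt == 0:
-- 		return cnt
-- 	else:
-- 		return sorted(nonZero)[int(cnt/2)]
-- ===== SOURCE B (Python) =====
-- def _select(lst, k):
--     # quickselect (three-way partition on the first element) for the k-th smallest
--     p = lst[0]
--     lows = [x for x in lst if x < p]
--     highs = [x for x in lst if x > p]
--     if k < len(lows):
--         return _select(lows, k)
--     if k < len(lst) - len(highs):
--         return p
--     return _select(highs, k - (len(lst) - len(highs)))
--
-- def _med(vals):
--     nz = [v for v in vals if v != 0]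
--     if not nz:
--         return 0
--     return _select(nz, len(nz) // 2)
--
-- def findHotTarget(targetList):
--     if len(targetList) < 3:
--         return (0, 0, 0)
--     return (_med([r[0] for r in targetList]),
--             _med([r[1] for r in targetList]),
--             _med([r[2] for r in targetList]))
-- ===== Notes on version B (the rewrite author's own statement) =====
-- stated objective: alternative
-- what changed: Replaces the append-loop column extraction plus full sort per coordinate by list comprehensions and a three-way-partition quickselect that finds the middle order statistic without sorting.
import Mathlib
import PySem

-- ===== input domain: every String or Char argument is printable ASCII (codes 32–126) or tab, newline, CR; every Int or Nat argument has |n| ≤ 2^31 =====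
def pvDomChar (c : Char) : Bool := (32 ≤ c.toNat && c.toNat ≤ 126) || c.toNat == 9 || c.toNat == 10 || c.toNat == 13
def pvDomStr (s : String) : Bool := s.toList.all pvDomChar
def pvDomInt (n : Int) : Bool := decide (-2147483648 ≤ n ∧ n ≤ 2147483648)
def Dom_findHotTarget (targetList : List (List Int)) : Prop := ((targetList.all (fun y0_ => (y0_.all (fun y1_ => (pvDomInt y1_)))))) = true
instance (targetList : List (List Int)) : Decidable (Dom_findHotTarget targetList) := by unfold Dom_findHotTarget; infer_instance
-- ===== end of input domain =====

-- B replaces A's append loops and per-coordinate full sort by list comprehensions and a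
-- three-way-partition quickselect for the middle order statistic (a different algorithm,
-- similar measured cost).

-- ===== PORT A =====
-- listMedian: collect nonzero elements by an append loop, sort, take index int(cnt/2).
def listMedian (inList : List Int) : Int :=
  let nonZero := inList.foldl (fun acc x => if x ≠ 0 then acc ++ [x] else acc) []
  let cnt := nonZero.length
  if cnt = 0 then (cnt : Int)
  else PySem.List.pyGetD (PySem.List.sorted nonZero (fun x => x) false) ((cnt / 2 : Nat) : Int) 0

-- targ[0]/targ[1]/targ[2] raise IndexError on rows shorter than 3; Pre_ excludes those inputs,
-- so the default 0 of pyGetD is never used under Pre_.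
def findHotTarget (targetList : List (List Int)) : Int × Int × Int :=
  if targetList.length < 3 then (0, 0, 0)
  else
    let cols := targetList.foldl
      (fun (acc : List Int × List Int × List Int) targ =>
        (acc.1 ++ [PySem.List.pyGetD targ 0 0],
         acc.2.1 ++ [PySem.List.pyGetD targ 1 0],
         acc.2.2 ++ [PySem.List.pyGetD targ 2 0])) ([], [], [])
    (listMedian cols.1, listMedian cols.2.1, listMedian cols.2.2)

-- ===== PORT B =====
-- quickselect: three-way partition on the first element.  Python's lst[0] raises on [],
-- which the callers never reach (k is always in range); the [] branch returns 0.
def selectB : List Int → Nat → Int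
  | [], _ => 0
  | p :: rest, k =>
    if k < ((p :: rest).filter (fun x => x < p)).length then
      selectB ((p :: rest).filter (fun x => x < p)) k
    else if k < (p :: rest).length - ((p :: rest).filter (fun x => p < x)).length then p
    else
      selectB ((p :: rest).filter (fun x => p < x))
        (k - ((p :: rest).length - ((p :: rest).filter (fun x => p < x)).length))
termination_by l _ => l.length
decreasing_by
  · exact List.length_filter_lt_length_iff_exists.2 ⟨p, List.mem_cons_self, by simp⟩
  · exact List.length_filter_lt_length_iff_exists.2 ⟨p, List.mem_cons_self, by simp⟩

def medB (vals : List Int) : Int :=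
  let nz := vals.filter (fun v => v ≠ 0)
  if nz = [] then 0 else selectB nz (nz.length / 2)

def findHotTarget_alt (targetList : List (List Int)) : Int × Int × Int :=
  if targetList.length < 3 then (0, 0, 0)
  else
    (medB (targetList.map (fun r => PySem.List.pyGetD r 0 0)),
     medB (targetList.map (fun r => PySem.List.pyGetD r 1 0)),
     medB (targetList.map (fun r => PySem.List.pyGetD r 2 0)))

-- ===== PRECONDITION & SPEC =====
-- Pre_ excludes exactly the inputs where A raises IndexError: 3 or more rows with some row
-- shorter than 3 entries (targ[2] out of range).
def Pre_findHotTarget (targetList : List (List Int)) : Prop :=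
  targetList.length < 3 ∨ ∀ r ∈ targetList, 3 ≤ r.length
instance (targetList : List (List Int)) : Decidable (Pre_findHotTarget targetList) := by
  unfold Pre_findHotTarget; infer_instance

def pvWitness_findHotTarget : List (List Int) := [[1, 2, 3], [4, 5, 6], [7, 8, 9]]

def Spec_findHotTarget (targetList : List (List Int)) (out : Int × Int × Int) : Prop := out = findHotTarget_alt targetList
instance (targetList : List (List Int)) (out : Int × Int × Int) : Decidable (Spec_findHotTarget targetList out) := by unfold Spec_findHotTarget; infer_instance

-- ===== CLAIM (what is proved, stated in full; the proofs are below) =====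
def Claim_equal_findHotTarget : Prop := ∀ (targetList : List (List Int)), Dom_findHotTarget targetList → Pre_findHotTarget targetList → Spec_findHotTarget targetList (findHotTarget targetList)

-- ===== LEMMAS AND PROOFS =====

-- The three-way partition of a list around p is a permutation of it.
theorem partition3_perm (l : List Int) (p : Int) :
    (l.filter (fun x => x < p) ++ l.filter (fun x => x = p) ++ l.filter (fun x => p < x)).Perm l := by
  induction l with
  | nil => simp
  | cons x t ih =>
    rcases lt_trichotomy x p with h | h | h
    · have h1 : ¬ p < x := not_lt.mpr (le_of_lt h)
      have h2 : x ≠ p := ne_of_lt h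
      simpa [List.filter_cons, h, h1, h2] using ih.cons x
    · subst h
      have h2 : (t.filter (fun y => decide (y < x)) ++ (t.filter (fun y => decide (y = x)) ++ t.filter (fun y => decide (x < y)))).Perm t := by
        simpa [List.append_assoc] using ih
      simpa [List.filter_cons, List.append_assoc] using (List.perm_middle.trans (h2.cons x))
    · have h1 : ¬ x < p := not_lt.mpr (le_of_lt h)
      have h2 : x ≠ p := ne_of_gt h
      simpa [List.filter_cons, h, h1, h2] using (List.perm_middle.trans (ih.cons x))

-- sorted(l) decomposes as sorted(lows) ++ equals ++ sorted(highs).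
theorem sorted_partition3 (l : List Int) (p : Int) :
    PySem.List.sorted l (fun x => x) false =
      PySem.List.sorted (l.filter (fun x => x < p)) (fun x => x) false
        ++ l.filter (fun x => x = p)
        ++ PySem.List.sorted (l.filter (fun x => p < x)) (fun x => x) false := by
  apply PySem.List.sorted_id_eq_of_perm_of_pairwise
  · exact (((PySem.List.sorted_perm _ _ _).append (List.Perm.refl _)).append
      (PySem.List.sorted_perm _ _ _)).trans (partition3_perm l p)
  · rw [List.pairwise_append, List.pairwise_append]
    refine ⟨⟨?_, ?_, ?_⟩, ?_, ?_⟩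
    · simpa using PySem.List.sorted_pairwise (l.filter (fun x => x < p)) (fun x => x)
    · refine List.pairwise_iff_forall_sublist.2 (fun {a b} hs => ?_)
      have ha : a = p := by
        simpa using (List.mem_filter.1 (hs.subset (by simp))).2
      have hb : b = p := by
        simpa using (List.mem_filter.1 (hs.subset (by simp))).2
      omega
    · intro a ha b hb
      rw [PySem.List.mem_sorted] at ha
      have ha' : a < p := by simpa using (List.mem_filter.1 ha).2
      have hb' : b = p := by simpa using (List.mem_filter.1 hb).2
      omega
    · simpa using PySem.List.sorted_pairwise (l.filter (fun x => p < x)) (fun x => x)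
    · intro a ha b hb
      rw [PySem.List.mem_sorted] at hb
      have hb' : p < b := by simpa using (List.mem_filter.1 hb).2
      rcases List.mem_append.1 ha with ha | ha
      · rw [PySem.List.mem_sorted] at ha
        have : a < p := by simpa using (List.mem_filter.1 ha).2
        omega
      · have : a = p := by simpa using (List.mem_filter.1 ha).2
        omega

-- quickselect = indexing into the sorted list
theorem selectB_eq_sorted (n : Nat) (l : List Int) (hn : l.length ≤ n) (k : Nat)
    (hk : k < l.length) :
    selectB l k = (PySem.List.sorted l (fun x => x) false).getD k 0 := by
  induction n generalizing l k with
  | zero => omega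
  | succ n ih =>
    match l with
    | [] => simp at hk
    | p :: rest =>
      have hd := sorted_partition3 (p :: rest) p
      have hlenperm := (partition3_perm (p :: rest) p).length_eq
      simp only [List.length_append] at hlenperm
      have hlows : ((p :: rest).filter (fun x => x < p)).length < (p :: rest).length :=
        List.length_filter_lt_length_iff_exists.2 ⟨p, List.mem_cons_self, by simp⟩
      have hhighs : ((p :: rest).filter (fun x => p < x)).length < (p :: rest).length :=
        List.length_filter_lt_length_iff_exists.2 ⟨p, List.mem_cons_self, by simp⟩
      have hsl : (PySem.List.sorted ((p :: rest).filter (fun x => x < p)) (fun x => x) false).length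
          = ((p :: rest).filter (fun x => x < p)).length := PySem.List.length_sorted _ _ _
      rw [selectB, hd]
      simp only [List.length_cons] at hn ⊢
      set A := (p :: rest).filter (fun x => x < p) with hA
      set E := (p :: rest).filter (fun x => x = p) with hE
      set H := (p :: rest).filter (fun x => p < x) with hH
      have hL : A.length + E.length + H.length = rest.length + 1 := by
        simpa using hlenperm
      have hk' : k < rest.length + 1 := by simpa using hk
      split_ifs with h1 h2
      · -- k lands in sorted lows
        rw [List.append_assoc, List.getD_eq_getElem?_getD,
            List.getElem?_append_left (by omega : k < (PySem.List.sorted A (fun x => x) false).length)]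
        rw [ih A (by omega) k h1]
        simp [List.getD_eq_getElem?_getD]
      · -- k lands among the elements equal to p
        have h2' : k < rest.length + 1 - H.length := h2
        have hk2 : k - A.length < E.length := by omega
        rw [List.append_assoc, List.getD_eq_getElem?_getD,
            List.getElem?_append_right (by omega), hsl,
            List.getElem?_append_left hk2]
        have hp : E[k - A.length] = p := by
          have hm := List.getElem_mem hk2
          have hm2 : E[k - A.length] ∈ (p :: rest).filter (fun x => x = p) := hm
          simpa using (List.mem_filter.1 hm2).2
        rw [List.getElem?_eq_getElem hk2]
        simp [hp]
      · -- k lands in sorted highs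
        have h2' : rest.length + 1 - H.length ≤ k := not_lt.1 h2
        have hk3 : k - (rest.length + 1 - H.length) < H.length := by omega
        rw [List.append_assoc, List.getD_eq_getElem?_getD,
            List.getElem?_append_right (by omega), hsl,
            List.getElem?_append_right (show E.length ≤ k - A.length by omega)]
        rw [show k - A.length - E.length = k - (rest.length + 1 - H.length) from by omega]
        rw [ih H (by omega) _ hk3, List.getD_eq_getElem?_getD]

-- A's median equals B's median on every list
theorem med_eq (l : List Int) : listMedian l = medB l := by
  simp only [listMedian, medB, PySem.List.foldl_append_ite_eq_filter, List.nil_append]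
  by_cases h : l.filter (fun x => decide (x ≠ 0)) = []
  · have h0 : ∀ a ∈ l, a = 0 := by
      have := List.filter_eq_nil_iff.1 h
      intro a ha
      simpa using this a ha
    have hl : (l.filter (fun x => decide (x ≠ 0))).length = 0 := by rw [h]; rfl
    rw [if_pos hl, if_pos h, hl]
    simp
  · have hlen : (l.filter (fun x => decide (x ≠ 0))).length ≠ 0 := by
      simpa [List.length_eq_zero_iff] using h
    rw [if_neg hlen, if_neg h, PySem.List.pyGetD_natCast,
        selectB_eq_sorted _ _ le_rfl _ (by omega)]

-- A's column-extraction loop builds the three map-columns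
theorem cols_eq (l : List (List Int)) (a b c : List Int) :
    l.foldl (fun (acc : List Int × List Int × List Int) targ =>
        (acc.1 ++ [PySem.List.pyGetD targ 0 0],
         acc.2.1 ++ [PySem.List.pyGetD targ 1 0],
         acc.2.2 ++ [PySem.List.pyGetD targ 2 0])) (a, b, c)
    = (a ++ l.map (fun r => PySem.List.pyGetD r 0 0),
       b ++ l.map (fun r => PySem.List.pyGetD r 1 0),
       c ++ l.map (fun r => PySem.List.pyGetD r 2 0)) := by
  induction l generalizing a b c with
  | nil => simp
  | cons x t ih => simp [List.foldl_cons, ih]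

-- ===== VERDICT (by name: the statement is the Claim_ definition above) =====
theorem findHotTarget_spec : Claim_equal_findHotTarget := by
  intro l _ _
  unfold Spec_findHotTarget findHotTarget findHotTarget_alt
  by_cases h : l.length < 3
  · simp [h]
  · simp only [h, if_false]
    rw [cols_eq]
    simp [med_eq]
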